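-- pv_equiv track=rewrite | github.com/jen-thomas/plotting-case-numbers | get_data.py | process_country
-- ===== SOURCE A (Python) =====
-- def process_country(country_information):
--     result = {}
--
--     reading = False
--     for key, items in country_information.items():
--         if key == '1/22/20':
--             reading = True
--
--         if reading:
--             result[key] = items
--
--     return result
-- ===== SOURCE B (Python) =====
-- def process_country(country_information):
--     items = list(country_information.items())
--     keys = [k for k, _ in items]
--     if '1/22/20' not in keys:
--         return {}
--     i = keys.index('1/22/20')
--     return dict(items[i:])
-- ===== Notes on version B (the rewrite author's own statement) =====
-- stated objective: simpler
-- what changed: Replaces the per-item boolean 'reading' flag with locating the pivot key once via list.index and slicing the item list from there, wrapping the tail in dict().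
import Mathlib
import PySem

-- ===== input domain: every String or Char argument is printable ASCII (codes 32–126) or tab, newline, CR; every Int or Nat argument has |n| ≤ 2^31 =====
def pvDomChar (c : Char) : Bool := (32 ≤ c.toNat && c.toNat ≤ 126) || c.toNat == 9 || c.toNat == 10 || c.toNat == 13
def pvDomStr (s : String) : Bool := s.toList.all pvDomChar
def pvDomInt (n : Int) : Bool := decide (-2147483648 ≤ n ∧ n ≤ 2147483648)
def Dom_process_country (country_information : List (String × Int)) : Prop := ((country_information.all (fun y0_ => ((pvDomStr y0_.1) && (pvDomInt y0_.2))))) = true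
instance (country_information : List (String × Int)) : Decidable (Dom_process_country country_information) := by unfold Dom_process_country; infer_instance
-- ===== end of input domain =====

-- B replaces A's per-item boolean 'reading' flag with a single index lookup of the pivot key and a slice of the tail (objective: simpler).


-- ===== PORT A =====
-- loop state: (result dict, reading flag); branches in A's order
def process_country (country_information : List (String × Int)) : List (String × Int) :=
  (country_information.foldl
    (fun (st : PySem.Dict String Int × Bool) kv =>
      let reading := if kv.1 = "1/22/20" then true else st.2
      (if reading then st.1.insert kv.1 kv.2 else st.1, reading))
    (PySem.Dict.empty, false)).1.items

-- ===== PORT B =====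
def process_country_alt (country_information : List (String × Int)) : List (String × Int) :=
  let keys := country_information.map Prod.fst
  if "1/22/20" ∈ keys then
    -- keys.index: total here since membership was just checked (getD 0 is a totality default, never used)
    let i : Nat := (PySem.List.index? keys "1/22/20").getD 0
    (PySem.Dict.ofList (PySem.List.slice country_information (some (i : Int)) none)).items
  else []

-- ===== PRECONDITION & SPEC =====
def Spec_process_country (country_information : List (String × Int)) (out : List (String × Int)) : Prop := out = process_country_alt country_information
instance (country_information : List (String × Int)) (out : List (String × Int)) : Decidable (Spec_process_country country_information out) := by unfold Spec_process_country; infer_instance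

-- ===== CLAIM (what is proved, stated in full; the proofs are below) =====
def Claim_equal_process_country : Prop := ∀ (country_information : List (String × Int)), Dom_process_country country_information → Spec_process_country country_information (process_country country_information)

-- ===== LEMMAS AND PROOFS =====

-- once the flag is true it stays true and every item is inserted
theorem pv_fold_true (xs : List (String × Int)) (d : PySem.Dict String Int) :
    (xs.foldl
      (fun (st : PySem.Dict String Int × Bool) kv =>
        let reading := if kv.1 = "1/22/20" then true else st.2
        (if reading then st.1.insert kv.1 kv.2 else st.1, reading))
      (d, true)) = (xs.foldl (fun d kv => d.insert kv.1 kv.2) d, true) := by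
  induction xs generalizing d with
  | nil => rfl
  | cons kv xs ih =>
      by_cases h : kv.1 = "1/22/20" <;>
        simp only [List.foldl_cons, h, ite_true, ite_self] <;>
        exact ih _

theorem pv_ofList_eq_foldl (p : List (String × Int)) :
    PySem.Dict.ofList p = p.foldl (fun d kv => d.insert kv.1 kv.2) PySem.Dict.empty := rfl

theorem pv_main (xs : List (String × Int)) : process_country xs = process_country_alt xs := by
  induction xs with
  | nil => rfl
  | cons kv xs ih =>
      obtain ⟨k, v⟩ := kv
      by_cases hk : k = "1/22/20"
      · subst hk
        unfold process_country process_country_alt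
        simp only [List.foldl_cons, List.map_cons, List.mem_cons, true_or, if_true,
          PySem.List.index?_cons_self, Option.getD_some]
        rw [pv_fold_true]
        simp [PySem.List.slice_zero_start, PySem.List.slice_none_none, pv_ofList_eq_foldl]
      · unfold process_country process_country_alt at ih ⊢
        simp only [List.foldl_cons, List.map_cons, hk, ite_false]
        by_cases hm : "1/22/20" ∈ xs.map Prod.fst
        · have hmem : "1/22/20" ∈ k :: xs.map Prod.fst := List.mem_cons_of_mem _ hm
          rw [if_pos hmem, if_pos hm] at *
          rw [PySem.List.index?_cons_of_ne _ hk]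
          obtain ⟨i, hi⟩ := Option.isSome_iff_exists.mp
            ((PySem.List.index?_isSome_iff (xs.map Prod.fst) "1/22/20").2 hm)
          rw [hi] at ih ⊢
          simp only [Option.map_some, Option.getD_some] at ih ⊢
          rw [PySem.List.slice_from_natCast ((k, v) :: xs) (i + 1),
            List.drop_succ_cons]
          rw [PySem.List.slice_from_natCast xs i] at ih
          exact ih
        · have hmem : "1/22/20" ∉ k :: xs.map Prod.fst := by
            simp only [List.mem_cons, not_or]
            exact ⟨fun h => hk h.symm, hm⟩
          rw [if_neg hmem, if_neg hm] at *
          exact ih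

-- ===== VERDICT (by name: the statement is the Claim_ definition above) =====
theorem process_country_spec : Claim_equal_process_country := by
  intro ci _
  exact pv_main ci
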